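-- pv_equiv track=rewrite | github.com/beva3/regrouping | regroup.py | regroup_characters
-- ===== SOURCE A (Python) =====
-- def regroup_characters(string):
--     """
--     Regroup characters by their type : voyels, consonants, digits, special characters.
--     """
--     groups = {
--         "voyels"    : [],
--         "consonants": [],
--         "digits"    : [],
--         "special"   : []
--     }
--     voyels_set = set("aeiouyAEIOUY")
--     consonants_set = set("bcdfghjklmnpqrstvwxzBCDFGHJKLMNPQRSTVWXZ")
--     digits_set = set("0123456789")
--     special_set = set("!@#$%^&*()_+-=[]{}|;':,.<>?/")
--     for c in string:
--         if c in voyels_set: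
--             if c not in groups["voyels"]:
--                 groups["voyels"].append(c)
--         elif c in consonants_set:
--             if c not in groups["consonants"]:
--                 groups["consonants"].append(c)
--         elif c in digits_set:
--             if c not in groups["digits"]:
--                 groups["digits"].append(c)
--         else:
--             if c not in groups["special"]:
--                 groups["special"].append(c)
--     return groups
-- ===== SOURCE B (Python) =====
-- def regroup_characters(string):
--     """
--     Regroup characters by their type : voyels, consonants, digits, special characters.
--     """
--     unique = list(dict.fromkeys(string))
--     lookup = {}
--     for v in "aeiouyAEIOUY":
--         lookup[v] = "voyels"
--     for c in "bcdfghjklmnpqrstvwxzBCDFGHJKLMNPQRSTVWXZ":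
--         lookup[c] = "consonants"
--     for d in "0123456789":
--         lookup[d] = "digits"
--     return {name: [c for c in unique if lookup.get(c, "special") == name]
--             for name in ("voyels", "consonants", "digits", "special")}
-- ===== Notes on version B (the rewrite author's own statement) =====
-- stated objective: idiomatic
-- what changed: A interleaves classification and dedup with a per-character not-in list scan; B first deduplicates with dict.fromkeys, builds one char-to-group lookup table, and produces each group as a single filter over the unique characters.
import Mathlib
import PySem

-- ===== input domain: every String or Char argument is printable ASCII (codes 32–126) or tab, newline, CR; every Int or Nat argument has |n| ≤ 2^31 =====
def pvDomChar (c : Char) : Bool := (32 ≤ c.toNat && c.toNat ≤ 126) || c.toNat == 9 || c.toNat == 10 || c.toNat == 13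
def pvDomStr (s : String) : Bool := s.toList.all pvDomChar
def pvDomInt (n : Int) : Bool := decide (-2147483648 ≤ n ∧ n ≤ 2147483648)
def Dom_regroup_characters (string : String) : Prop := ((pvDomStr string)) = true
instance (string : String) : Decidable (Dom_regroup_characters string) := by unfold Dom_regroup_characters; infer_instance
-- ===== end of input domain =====

-- B replaces A's interleaved classify-and-dedup (with a linear not-in scan per character)
-- by an ordered dedup pass (dict.fromkeys) followed by a table-driven filter per group.

-- ===== PORT A =====
def pvVoyelsSet : PySem.Set Char := PySem.Set.ofList "aeiouyAEIOUY".toList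
def pvConsonantsSet : PySem.Set Char := PySem.Set.ofList "bcdfghjklmnpqrstvwxzBCDFGHJKLMNPQRSTVWXZ".toList
def pvDigitsSet : PySem.Set Char := PySem.Set.ofList "0123456789".toList
-- (A also builds special_set, but never consults it: its final branch is a bare else — so it is not ported)

-- the loop body of A, over the four group lists (voyels, consonants, digits, special)
def pvStepA (g : List String × List String × List String × List String) (c : Char) :
    List String × List String × List String × List String :=
  if pvVoyelsSet.contains c then
    (if g.1.contains (String.ofList [c]) then g else (g.1 ++ [String.ofList [c]], g.2))
  else if pvConsonantsSet.contains c then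
    (if g.2.1.contains (String.ofList [c]) then g else (g.1, g.2.1 ++ [String.ofList [c]], g.2.2))
  else if pvDigitsSet.contains c then
    (if g.2.2.1.contains (String.ofList [c]) then g else (g.1, g.2.1, g.2.2.1 ++ [String.ofList [c]], g.2.2.2))
  else
    (if g.2.2.2.contains (String.ofList [c]) then g else (g.1, g.2.1, g.2.2.1, g.2.2.2 ++ [String.ofList [c]]))

def regroup_characters (string : String) : List (String × List String) :=
  let g := string.toList.foldl pvStepA ([], [], [], [])
  [("voyels", g.1), ("consonants", g.2.1), ("digits", g.2.2.1), ("special", g.2.2.2)]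

-- ===== PORT B =====
def pvLookupB : PySem.Dict Char String :=
  let d := "aeiouyAEIOUY".toList.foldl (fun d v => d.insert v "voyels") PySem.Dict.empty
  let d := "bcdfghjklmnpqrstvwxzBCDFGHJKLMNPQRSTVWXZ".toList.foldl (fun d c => d.insert c "consonants") d
  "0123456789".toList.foldl (fun d c => d.insert c "digits") d

def regroup_characters_alt (string : String) : List (String × List String) :=
  let unique := PySem.List.dedup string.toList
  ["voyels", "consonants", "digits", "special"].map (fun name =>
    (name, (unique.filter (fun c => pvLookupB.getD c "special" == name)).map (fun c => String.ofList [c])))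

-- ===== PRECONDITION & SPEC =====
def Spec_regroup_characters (string : String) (out : List (String × List String)) : Prop := out = regroup_characters_alt string
instance (string : String) (out : List (String × List String)) : Decidable (Spec_regroup_characters string out) := by unfold Spec_regroup_characters; infer_instance

-- ===== CLAIM (what is proved, stated in full; the proofs are below) =====
def Claim_equal_regroup_characters : Prop := ∀ (string : String), Dom_regroup_characters string → Spec_regroup_characters string (regroup_characters string)

-- ===== LEMMAS AND PROOFS =====

-- the group that B's lookup table assigns to a character
def pvName (c : Char) : String := pvLookupB.getD c "special"

-- B's group list for a given name, from a char list
def pvGrp (name : String) (l : List Char) : List String :=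
  ((PySem.List.dedup l).filter (fun c => pvName c == name)).map (fun c => String.ofList [c])

-- on ASCII (the whole Dom) B's table agrees with A's membership tests
set_option maxRecDepth 10000 in
theorem pvName_eq_ascii (c : Char) (h : c.toNat < 128) :
    pvName c = (if pvVoyelsSet.contains c then "voyels"
      else if pvConsonantsSet.contains c then "consonants"
      else if pvDigitsSet.contains c then "digits" else "special") := by
  have key : ∀ n : Nat, n < 128 → (pvName (Char.ofNat n) = (if pvVoyelsSet.contains (Char.ofNat n) then "voyels"
      else if pvConsonantsSet.contains (Char.ofNat n) then "consonants"
      else if pvDigitsSet.contains (Char.ofNat n) then "digits" else "special")) := by decide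
  have := key c.toNat h
  rwa [Char.ofNat_toNat] at this

theorem mem_map_singleton (c : Char) (xs : List Char) :
    (String.ofList [c]) ∈ xs.map (fun x => String.ofList [x]) ↔ c ∈ xs := by
  simp only [List.mem_map]
  constructor
  · rintro ⟨x, hx, he⟩
    obtain rfl : x = c := by simpa using congrArg String.toList he
    exact hx
  · exact fun h => ⟨c, h, rfl⟩

theorem pvGrp_snoc (name : String) (l : List Char) (c : Char) :
    pvGrp name (l ++ [c]) =
      if c ∈ l then pvGrp name l
      else if pvName c == name then pvGrp name l ++ [String.ofList [c]] else pvGrp name l := by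
  unfold pvGrp
  have hd : PySem.List.dedup (l ++ [c]) = PySem.Set.add (PySem.List.dedup l) c := by
    simp [PySem.List.dedup_eq_ofList, PySem.Set.ofList_eq_foldl, List.foldl_append]
  rw [hd]
  unfold PySem.Set.add
  by_cases hc : c ∈ l
  · have : PySem.Set.contains (PySem.List.dedup l) c = true := by
      simp [PySem.Set.contains, hc]
    simp [hc]
  · have : PySem.Set.contains (PySem.List.dedup l) c = false := by
      simp [PySem.Set.contains, hc]
    simp only [this, Bool.false_eq_true, if_false, if_neg hc, List.filter_append, List.map_append,
      List.filter_cons, List.filter_nil]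
    by_cases hn : pvName c == name <;> simp [hn]

-- loop invariant: A's fold state over l is B's four filtered groups
theorem pvFold_eq (l : List Char) (hl : ∀ c ∈ l, c.toNat < 128) :
    l.foldl pvStepA ([], [], [], []) =
      (pvGrp "voyels" l, pvGrp "consonants" l, pvGrp "digits" l, pvGrp "special" l) := by
  induction l using List.reverseRecOn with
  | nil => rfl
  | append_singleton l c ih =>
    have hc : c.toNat < 128 := hl c (by simp)
    have hl' : ∀ x ∈ l, x.toNat < 128 := fun x hx => hl x (by simp [hx])
    rw [List.foldl_append, List.foldl_cons, List.foldl_nil, ih hl']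
    have hmem : ∀ name, (String.ofList [c]) ∈ pvGrp name l ↔ (pvName c == name ∧ c ∈ l) := by
      intro name
      unfold pvGrp
      rw [mem_map_singleton]
      simp [List.mem_filter, and_comm]
    rw [pvGrp_snoc, pvGrp_snoc, pvGrp_snoc, pvGrp_snoc]
    unfold pvStepA
    rw [pvName_eq_ascii c hc] at hmem ⊢
    by_cases h1 : pvVoyelsSet.contains c <;> by_cases h2 : pvConsonantsSet.contains c <;>
      by_cases h3 : pvDigitsSet.contains c <;>
      by_cases hcl : c ∈ l <;>
      simp only [h1, h2, h3, if_true, if_false, Bool.false_eq_true] <;>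
      · have m1 := hmem "voyels"; have m2 := hmem "consonants"
        have m3 := hmem "digits"; have m4 := hmem "special"
        simp only [h1, h2, h3, if_true, if_false, Bool.false_eq_true] at m1 m2 m3 m4
        simp_all

-- ===== VERDICT (by name: the statement is the Claim_ definition above) =====
theorem regroup_characters_spec : Claim_equal_regroup_characters := by
  intro s hdom
  unfold Spec_regroup_characters regroup_characters regroup_characters_alt
  have hl : ∀ c ∈ s.toList, c.toNat < 128 := by
    intro c hc
    have := List.all_eq_true.mp hdom c hc
    simp only [pvDomChar, Bool.or_eq_true, Bool.and_eq_true, decide_eq_true_eq, beq_iff_eq,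
      Nat.le_iff_lt_or_eq] at this
    omega
  rw [pvFold_eq s.toList hl]
  simp [pvGrp, List.map, pvName]
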